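-- pv_equiv track=rewrite | github.com/gustavo-moura/SCC5900-algorithm-design | 05-backtracking-passwords/backtracking.py | get_passwords_from_rule
-- ===== SOURCE A (Python) =====
-- from itertools import product
--
-- def get_passwords_from_rule(words, rule):
--
--     digits = [str(i) for i in range(10)]
--
--     par = []
--     for char in rule:
--         if char == '#':
--             par.append(words)
--         if char == '0':
--             par.append(digits)
--
--     passwords = []
--     for t in product(*par):
--         passwords.append(''.join(t))
--
--     return passwords
-- ===== SOURCE B (Python) =====
-- def get_passwords_from_rule(words, rule):
--     digits = [str(i) for i in range(10)]
--
--     alphabets = []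
--     for char in rule:
--         if char == '#':
--             alphabets.append(words)
--         elif char == '0':
--             alphabets.append(digits)
--
--     results = []
--
--     def backtrack(i, prefix):
--         if i == len(alphabets):
--             results.append(prefix)
--             return
--         for item in alphabets[i]:
--             backtrack(i + 1, prefix + item)
--
--     backtrack(0, '')
--     return results
-- ===== Notes on version B (the rewrite author's own statement) =====
-- stated objective: alternative
-- what changed: Replaces the itertools.product tuple enumeration plus ''.join pass by explicit recursive backtracking that extends a string prefix position by position, appending each completed prefix directly.
import Mathlib
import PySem

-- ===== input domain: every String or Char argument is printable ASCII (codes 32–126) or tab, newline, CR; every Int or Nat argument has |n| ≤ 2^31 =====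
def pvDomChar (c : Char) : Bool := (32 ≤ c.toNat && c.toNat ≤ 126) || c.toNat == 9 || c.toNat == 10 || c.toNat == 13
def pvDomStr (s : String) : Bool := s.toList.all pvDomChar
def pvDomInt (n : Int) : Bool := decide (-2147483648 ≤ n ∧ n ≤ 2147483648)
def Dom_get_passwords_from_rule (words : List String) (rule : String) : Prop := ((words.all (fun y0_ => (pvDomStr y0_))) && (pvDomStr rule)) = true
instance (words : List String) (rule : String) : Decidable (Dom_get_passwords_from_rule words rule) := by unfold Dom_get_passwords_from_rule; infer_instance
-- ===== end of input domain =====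

-- B replaces the itertools.product enumeration + ''.join by recursive backtracking on a string prefix (alternative decomposition, same cost).

-- ===== PORT A =====
-- digits = [str(i) for i in range(10)]
def pvDigits : List String := (PySem.List.pyRange 0 10 1).map PySem.Int.toStr

-- par built by the loop with two successive ifs
def pvParA (words : List String) (rule : String) : List (List String) :=
  rule.toList.foldl (fun par c =>
    let par := if c = '#' then par ++ [words] else par
    if c = '0' then par ++ [pvDigits] else par) []

-- itertools.product(*par): list of tuples in product order (rightmost varies fastest)
def pvProduct (par : List (List String)) : List (List String) :=
  par.foldl (fun acc alpha => acc.flatMap (fun t => alpha.map (fun x => t ++ [x]))) [[]]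

def get_passwords_from_rule (words : List String) (rule : String) : List String :=
  (pvProduct (pvParA words rule)).foldl (fun passwords t => passwords ++ [String.join t]) []

-- ===== PORT B =====
-- alphabets built by the loop with if/elif
def pvParB (words : List String) (rule : String) : List (List String) :=
  rule.toList.foldl (fun al c =>
    if c = '#' then al ++ [words]
    else if c = '0' then al ++ [pvDigits] else al) []

-- backtrack(i, prefix): recursion on the remaining alphabets, extending the prefix
def pvBacktrack (alphas : List (List String)) (pre : String) : List String :=
  match alphas with
  | [] => [pre]
  | a :: rest => a.flatMap (fun x => pvBacktrack rest (pre ++ x))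

def get_passwords_from_rule_alt (words : List String) (rule : String) : List String :=
  pvBacktrack (pvParB words rule) ""

-- ===== PRECONDITION & SPEC =====
def Spec_get_passwords_from_rule (words : List String) (rule : String) (out : List String) : Prop := out = get_passwords_from_rule_alt words rule
instance (words : List String) (rule : String) (out : List String) : Decidable (Spec_get_passwords_from_rule words rule out) := by unfold Spec_get_passwords_from_rule; infer_instance

-- ===== CLAIM (what is proved, stated in full; the proofs are below) =====
def Claim_equal_get_passwords_from_rule : Prop := ∀ (words : List String) (rule : String), Dom_get_passwords_from_rule words rule → Spec_get_passwords_from_rule words rule (get_passwords_from_rule words rule)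

-- ===== LEMMAS AND PROOFS =====

theorem pvPar_eq (words : List String) (rule : String) : pvParA words rule = pvParB words rule := by
  unfold pvParA pvParB
  have hf : (fun (par : List (List String)) (c : Char) =>
      let par := if c = '#' then par ++ [words] else par
      if c = '0' then par ++ [pvDigits] else par)
    = (fun (al : List (List String)) (c : Char) =>
      if c = '#' then al ++ [words]
      else if c = '0' then al ++ [pvDigits] else al) := by
    funext par c
    by_cases h : c = '#'
    · subst h; simp
    · simp [h]
  rw [hf]

theorem join_append_single (t : List String) (x : String) :
    String.join (t ++ [x]) = String.join t ++ x := by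
  simp [String.join, List.foldl_append]

theorem foldl_append_singleton_map {α β : Type} (f : α → β) (l : List α) (acc : List β) :
    l.foldl (fun r t => r ++ [f t]) acc = acc ++ l.map f := by
  induction l generalizing acc with
  | nil => simp
  | cons a l ih => simp [ih, List.append_assoc]

theorem product_map_join (par : List (List String)) (acc : List (List String)) :
    ((par.foldl (fun acc alpha => acc.flatMap (fun t => alpha.map (fun x => t ++ [x]))) acc).map String.join)
      = acc.flatMap (fun t => pvBacktrack par (String.join t)) := by
  induction par generalizing acc with
  | nil =>
      simp only [List.foldl_nil, pvBacktrack]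
      rw [List.map_eq_flatMap]
  | cons a rest ih =>
      simp only [List.foldl_cons, ih, pvBacktrack, List.flatMap_assoc]
      congr 1
      funext t
      rw [List.flatMap_map]
      congr 1
      funext x
      rw [join_append_single]

-- ===== VERDICT (by name: the statement is the Claim_ definition above) =====
theorem get_passwords_from_rule_spec : Claim_equal_get_passwords_from_rule := by
  intro words rule _
  show _ = _
  unfold get_passwords_from_rule get_passwords_from_rule_alt
  rw [foldl_append_singleton_map, pvPar_eq]
  have h := product_map_join (pvParB words rule) [[]]
  simp only [pvProduct]
  simp at h ⊢
  simpa [String.join] using h
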